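-- pv_equiv track=rewrite | github.com/abodinier/Graphical-Models | HMM Text Segmentation/HMC/Result_HMC_Down_Bis/hmc_chunk_conll2003.py | construct_train_set_features
-- ===== SOURCE A (Python) =====
-- def convert_word_to_features(idw, word, suffix_len):
--     features = word[-suffix_len:]
--
--     if word[0] == word[0].upper():
--         features = features + "U"
--     else:
--         features = features + "NU"
--
--     if "-" in word:
--         features = features + "H"
--     else:
--         features = features + "NH"
--
--     if idw == 0:
--         features = features + "F"
--     else:
--         features = features + "NF"
--
--     if True in [c.isdigit() for c in word]:
--         features = features + "D"
--     else:
--         features = features + "ND"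
--
--     return features
--
-- def construct_train_set_features(train_set):
--     train_set_features = []
--     for sent in train_set:
--         sent_features = [(x, convert_word_to_features(idy, y, 3)) for idy, (x, y) in enumerate(sent)]
--         train_set_features.append(sent_features)
--         sent_features = [(x, convert_word_to_features(idy, y, 2)) for idy, (x, y) in enumerate(sent)]
--         train_set_features.append(sent_features)
--         sent_features = [(x, convert_word_to_features(idy, y, 1)) for idy, (x, y) in enumerate(sent)]
--         train_set_features.append(sent_features)
--         sent_features = [(x, convert_word_to_features(idy, y, 0)) for idy, (x, y) in enumerate(sent)]
--         train_set_features.append(sent_features)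
--
--     return train_set_features
-- ===== SOURCE B (Python) =====
-- def construct_train_set_features(train_set):
--     rows = []
--     for sent in train_set:
--         r3, r2, r1, r0 = [], [], [], []
--         for idy, (x, word) in enumerate(sent):
--             flag = ("U" if word[0] == word[0].upper() else "NU") \
--                  + ("H" if "-" in word else "NH") \
--                  + ("F" if idy == 0 else "NF") \
--                  + ("D" if any(c.isdigit() for c in word) else "ND")
--             r3.append((x, word[-3:] + flag))
--             r2.append((x, word[-2:] + flag))
--             r1.append((x, word[-1:] + flag))
--             r0.append((x, word + flag))
--         rows.extend((r3, r2, r1, r0))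
--     return rows
-- ===== Notes on version B (the rewrite author's own statement) =====
-- stated objective: faster
-- what changed: B makes a SINGLE pass over each sentence, maintaining four accumulator lists (one per suffix length) and computing each word's flag checks once, instead of A's four separate full-sentence comprehension passes that recompute every flag check per suffix length.
import Mathlib
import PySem

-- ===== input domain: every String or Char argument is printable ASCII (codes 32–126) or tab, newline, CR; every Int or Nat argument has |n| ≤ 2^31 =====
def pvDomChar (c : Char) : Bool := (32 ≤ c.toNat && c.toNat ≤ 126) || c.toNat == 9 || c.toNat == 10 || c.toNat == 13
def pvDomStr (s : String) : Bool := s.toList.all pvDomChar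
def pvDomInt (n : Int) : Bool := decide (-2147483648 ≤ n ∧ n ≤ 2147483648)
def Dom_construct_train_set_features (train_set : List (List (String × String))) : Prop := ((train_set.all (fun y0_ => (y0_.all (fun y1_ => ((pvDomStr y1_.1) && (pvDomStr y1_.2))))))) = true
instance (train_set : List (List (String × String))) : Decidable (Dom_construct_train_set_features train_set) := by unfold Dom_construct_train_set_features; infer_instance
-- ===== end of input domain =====

-- B replaces A's four full-sentence passes by ONE pass per sentence with four accumulator
-- lists (flag checks computed once per word); objective: faster by a constant factor.


-- ===== PORT A =====
-- convert_word_to_features(idw, word, suffix_len); word[0] raises IndexError on the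
-- empty word (excluded by Pre_), the `none` branch of the match marks that spot.
def pvConvA (idw : Int) (w : List Char) (suffix_len : Int) : List Char :=
  let f := PySem.Chars.slice w (some (-suffix_len)) none
  let f := match PySem.List.pyGet? w 0 with
    | some c => if c == PySem.Chars.upperChar c then f ++ ['U'] else f ++ ['N','U']
    | none => f
  let f := if PySem.Chars.isIn ['-'] w then f ++ ['H'] else f ++ ['N','H']
  let f := if idw == 0 then f ++ ['F'] else f ++ ['N','F']
  let f := if (w.map (fun c => PySem.Chars.isdigit c)).contains true then f ++ ['D'] else f ++ ['N','D']
  f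

def construct_train_set_features (train_set : List (List (String × String))) : List (List (String × String)) :=
  train_set.foldl (fun acc sent =>
    let s3 := (PySem.List.enumerate sent).map (fun e => (e.2.1, String.ofList (pvConvA e.1 e.2.2.toList 3)))
    let acc := acc ++ [s3]
    let s2 := (PySem.List.enumerate sent).map (fun e => (e.2.1, String.ofList (pvConvA e.1 e.2.2.toList 2)))
    let acc := acc ++ [s2]
    let s1 := (PySem.List.enumerate sent).map (fun e => (e.2.1, String.ofList (pvConvA e.1 e.2.2.toList 1)))
    let acc := acc ++ [s1]
    let s0 := (PySem.List.enumerate sent).map (fun e => (e.2.1, String.ofList (pvConvA e.1 e.2.2.toList 0)))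
    acc ++ [s0]) []

-- ===== PORT B =====
-- the suffix-independent flag string of a word ("U"/"NU" ++ "H"/"NH" ++ "F"/"NF" ++ "D"/"ND")
def pvFlagB (idy : Int) (w : List Char) : List Char :=
  (match PySem.List.pyGet? w 0 with
    | some c => if c == PySem.Chars.upperChar c then ['U'] else ['N','U']
    | none => []) ++
  (if PySem.Chars.isIn ['-'] w then ['H'] else ['N','H']) ++
  (if idy == 0 then ['F'] else ['N','F']) ++
  (if w.any (fun c => PySem.Chars.isdigit c) then ['D'] else ['N','D'])

-- one pass over the sentence, four accumulator lists r3,r2,r1,r0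
def pvSentRowsB (sent : List (String × String)) :
    List (String × String) × List (String × String) × List (String × String) × List (String × String) :=
  (PySem.List.enumerate sent).foldl (fun r e =>
    let w := e.2.2.toList
    let flag := pvFlagB e.1 w
    (r.1 ++ [(e.2.1, String.ofList (PySem.Chars.slice w (some (-3)) none ++ flag))],
     r.2.1 ++ [(e.2.1, String.ofList (PySem.Chars.slice w (some (-2)) none ++ flag))],
     r.2.2.1 ++ [(e.2.1, String.ofList (PySem.Chars.slice w (some (-1)) none ++ flag))],
     r.2.2.2 ++ [(e.2.1, String.ofList (w ++ flag))])) ([], [], [], [])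

def construct_train_set_features_alt (train_set : List (List (String × String))) : List (List (String × String)) :=
  train_set.foldl (fun rows sent =>
    let r := pvSentRowsB sent
    rows ++ [r.1, r.2.1, r.2.2.1, r.2.2.2]) []

-- ===== PRECONDITION & SPEC =====
-- Pre_ excludes inputs containing an empty word, on which both A and B raise IndexError at word[0].
def Pre_construct_train_set_features (train_set : List (List (String × String))) : Prop :=
  ∀ sent ∈ train_set, ∀ p ∈ sent, p.2 ≠ ""
instance (train_set : List (List (String × String))) : Decidable (Pre_construct_train_set_features train_set) := by unfold Pre_construct_train_set_features; infer_instance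
def pvWitness_construct_train_set_features : (List (List (String × String))) := [[("N", "Ab-1"), ("V", "xy")]]
def Spec_construct_train_set_features (train_set : List (List (String × String))) (out : List (List (String × String))) : Prop := out = construct_train_set_features_alt train_set
instance (train_set : List (List (String × String))) (out : List (List (String × String))) : Decidable (Spec_construct_train_set_features train_set out) := by unfold Spec_construct_train_set_features; infer_instance

-- ===== CLAIM (what is proved, stated in full; the proofs are below) =====
def Claim_equal_construct_train_set_features : Prop := ∀ (train_set : List (List (String × String))), Dom_construct_train_set_features train_set → Pre_construct_train_set_features train_set → Spec_construct_train_set_features train_set (construct_train_set_features train_set)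

-- ===== LEMMAS AND PROOFS =====
theorem contains_map_true (w : List Char) (f : Char → Bool) :
    (w.map f).contains true = w.any f := by
  induction w with
  | nil => rfl
  | cons a l ih =>
      simp only [List.map_cons, List.contains_cons, List.any_cons, ih, Bool.true_beq]

theorem pvConv_eq (idw : Int) (w : List Char) (s : Int) :
    pvConvA idw w s = PySem.Chars.slice w (some (-s)) none ++ pvFlagB idw w := by
  unfold pvConvA pvFlagB
  rw [contains_map_true]
  cases h : PySem.List.pyGet? w 0 with
  | none => split_ifs <;> simp [List.append_assoc]
  | some c =>
      split_ifs <;> by_cases hc : (c == PySem.Chars.upperChar c) = true <;>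
        simp [hc, List.append_assoc]

-- B's single pass with four accumulators equals the four maps A takes over the sentence
theorem pvSentRowsB_inv (l : List (Int × String × String))
    (a3 a2 a1 a0 : List (String × String)) :
    l.foldl (fun r e =>
      let w := e.2.2.toList
      let flag := pvFlagB e.1 w
      (r.1 ++ [(e.2.1, String.ofList (PySem.Chars.slice w (some (-3)) none ++ flag))],
       r.2.1 ++ [(e.2.1, String.ofList (PySem.Chars.slice w (some (-2)) none ++ flag))],
       r.2.2.1 ++ [(e.2.1, String.ofList (PySem.Chars.slice w (some (-1)) none ++ flag))],
       r.2.2.2 ++ [(e.2.1, String.ofList (w ++ flag))])) (a3, a2, a1, a0)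
    = (a3 ++ l.map (fun e => (e.2.1, String.ofList (pvConvA e.1 e.2.2.toList 3))),
       a2 ++ l.map (fun e => (e.2.1, String.ofList (pvConvA e.1 e.2.2.toList 2))),
       a1 ++ l.map (fun e => (e.2.1, String.ofList (pvConvA e.1 e.2.2.toList 1))),
       a0 ++ l.map (fun e => (e.2.1, String.ofList (pvConvA e.1 e.2.2.toList 0)))) := by
  induction l generalizing a3 a2 a1 a0 with
  | nil => simp
  | cons e t ih =>
      simp only [List.foldl_cons, List.map_cons, ih, List.append_assoc, List.cons_append,
        List.nil_append, pvConv_eq]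
      simp [PySem.List.slice_zero_start, PySem.List.slice_none_none]

theorem pvSentRowsB_eq (sent : List (String × String)) :
    pvSentRowsB sent
    = ((PySem.List.enumerate sent).map (fun e => (e.2.1, String.ofList (pvConvA e.1 e.2.2.toList 3))),
       (PySem.List.enumerate sent).map (fun e => (e.2.1, String.ofList (pvConvA e.1 e.2.2.toList 2))),
       (PySem.List.enumerate sent).map (fun e => (e.2.1, String.ofList (pvConvA e.1 e.2.2.toList 1))),
       (PySem.List.enumerate sent).map (fun e => (e.2.1, String.ofList (pvConvA e.1 e.2.2.toList 0)))) := by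
  unfold pvSentRowsB
  rw [pvSentRowsB_inv]
  simp

-- ===== VERDICT (by name: the statement is the Claim_ definition above) =====
theorem construct_train_set_features_spec : Claim_equal_construct_train_set_features := by
  intro ts _ _
  unfold Spec_construct_train_set_features construct_train_set_features construct_train_set_features_alt
  apply PySem.List.foldl_congr_mem
  intro acc sent _
  simp [pvSentRowsB_eq, List.append_assoc]
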